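-- pv_equiv track=rewrite | github.com/Murilo-Fernandes/Teste-t-cnico-XYZ | passwords.py | getRegistrationStatus
-- ===== SOURCE A (Python) =====
-- def getRegistrationStatus(passwords, k):
--     # Write your code here
--     password_count = {}
--     results =  []
--
--     for password in passwords:
--         if password not in password_count:
--             password_count[password] = 0
--
--         if password_count[password] < k:
--             results.append("ACCEPT")
--             password_count[password] += 1
--         else:
--             results.append("REJECT")
--
--     return results
-- ===== SOURCE B (Python) =====
-- def getRegistrationStatus(passwords, k):
--     # Stage 1: group positions by password (one pass).
--     groups = {}
--     for i, p in enumerate(passwords):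
--         groups.setdefault(p, []).append(i)
--     # Stage 2: preallocate and scatter verdicts by occurrence rank per group.
--     results = [""] * len(passwords)
--     for p, idxs in groups.items():
--         for rank, i in enumerate(idxs):
--             results[i] = "ACCEPT" if rank < k else "REJECT"
--     return results
-- ===== Notes on version B (the rewrite author's own statement) =====
-- stated objective: alternative
-- what changed: Replaces A's single stateful pass with a capped per-password counter by a two-stage algorithm: first build a password -> occurrence-positions index with enumerate, then preallocate the output and scatter ACCEPT/REJECT into it per group by occurrence rank (rank < k).
import Mathlib
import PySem

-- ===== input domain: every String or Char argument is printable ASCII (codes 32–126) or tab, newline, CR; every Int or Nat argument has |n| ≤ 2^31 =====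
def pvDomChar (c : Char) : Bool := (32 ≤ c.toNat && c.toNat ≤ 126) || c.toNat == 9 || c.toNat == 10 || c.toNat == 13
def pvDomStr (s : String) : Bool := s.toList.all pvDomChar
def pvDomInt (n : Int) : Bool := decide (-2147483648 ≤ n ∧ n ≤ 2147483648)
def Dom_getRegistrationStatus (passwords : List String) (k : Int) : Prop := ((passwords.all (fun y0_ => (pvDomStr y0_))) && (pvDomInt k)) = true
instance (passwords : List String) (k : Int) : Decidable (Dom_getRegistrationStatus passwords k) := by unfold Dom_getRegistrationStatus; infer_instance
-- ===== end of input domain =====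

-- B replaces A's single capped-counter pass by two stages: group positions by
-- password, then scatter ACCEPT/REJECT into a preallocated list by occurrence rank
-- (alternative decomposition, same cost).

-- ===== PORT A =====
def getRegistrationStatus (passwords : List String) (k : Int) : List String :=
  (passwords.foldl
    (fun (st : PySem.Dict String Int × List String) password =>
      let d := if st.1.contains password then st.1 else st.1.insert password 0
      if d.getD password 0 < k then
        (d.insert password (d.getD password 0 + 1), st.2 ++ ["ACCEPT"])
      else
        (d, st.2 ++ ["REJECT"]))
    (PySem.Dict.empty, [])).2

-- ===== PORT B =====
def getRegistrationStatus_alt (passwords : List String) (k : Int) : List String :=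
  let groups : PySem.Dict String (List Int) :=
    (PySem.List.enumerate passwords 0).foldl
      (fun d ip => d.modify ip.2 [] (· ++ [ip.1])) PySem.Dict.empty
  let results : List String := List.replicate passwords.length ""
  groups.items.foldl
    (fun res pidxs =>
      (PySem.List.enumerate pidxs.2 0).foldl
        (fun res ri => res.set ri.2.toNat (if ri.1 < k then "ACCEPT" else "REJECT"))
        res)
    results

-- ===== PRECONDITION & SPEC =====
def Spec_getRegistrationStatus (passwords : List String) (k : Int) (out : List String) : Prop := out = getRegistrationStatus_alt passwords k
instance (passwords : List String) (k : Int) (out : List String) : Decidable (Spec_getRegistrationStatus passwords k out) := by unfold Spec_getRegistrationStatus; infer_instance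

-- ===== CLAIM (what is proved, stated in full; the proofs are below) =====
def Claim_equal_getRegistrationStatus : Prop := ∀ (passwords : List String) (k : Int), Dom_getRegistrationStatus passwords k → Spec_getRegistrationStatus passwords k (getRegistrationStatus passwords k)

-- ===== LEMMAS AND PROOFS =====

-- Common characterisation: the verdict list for `rest` processed after prefix `pre`.
def pvRoster (k : Int) : List String → List String → List String
  | _, [] => []
  | pre, p :: rest =>
      (if ((pre.count p : Nat) : Int) < k then "ACCEPT" else "REJECT") :: pvRoster k (pre ++ [p]) rest

lemma pvRoster_length (k : Int) (rest : List String) : ∀ pre, (pvRoster k pre rest).length = rest.length := by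
  induction rest with
  | nil => intro pre; simp [pvRoster]
  | cons p rest ih => intro pre; simp [pvRoster, ih]

lemma pvRoster_getElem (k : Int) (rest : List String) : ∀ pre (j : Nat) (h : j < rest.length),
    (pvRoster k pre rest)[j]'(by rw [pvRoster_length]; exact h)
      = (if (((pre ++ rest.take j).count (rest[j]) : Nat) : Int) < k then "ACCEPT" else "REJECT") := by
  induction rest with
  | nil => intro pre j h; simp at h
  | cons p rest ih =>
    intro pre j h
    cases j with
    | zero => simp [pvRoster]
    | succ j =>
      have h' : j < rest.length := by simpa using h
      have := ih (pre ++ [p]) j h'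
      simpa [pvRoster, List.append_assoc] using this

-- A's loop produces pvRoster (invariant: the dict holds min(count so far, max k 0)).
lemma pvA_loop (k : Int) (rest : List String) : ∀ (pre : List String)
    (d : PySem.Dict String Int) (acc : List String),
    (∀ p, d.getD p 0 = min ((pre.count p : Nat) : Int) (max k 0)) →
    (rest.foldl
      (fun (st : PySem.Dict String Int × List String) password =>
        let d := if st.1.contains password then st.1 else st.1.insert password 0
        if d.getD password 0 < k then
          (d.insert password (d.getD password 0 + 1), st.2 ++ ["ACCEPT"])
        else
          (d, st.2 ++ ["REJECT"]))
      (d, acc)).2 = acc ++ pvRoster k pre rest := by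
  induction rest with
  | nil => intro pre d acc _; simp [pvRoster]
  | cons p rest ih =>
    intro pre d acc h
    have hd' : ∀ q, (if d.contains p then d else d.insert p 0).getD q 0 = d.getD q 0 := by
      intro q
      by_cases hc : d.contains p
      · simp [hc]
      · have he : (if d.contains p then d else d.insert p 0) = d.insert p 0 := by simp [hc]
        rw [he, PySem.Dict.getD_insert]
        by_cases hq : q = p
        · rw [if_pos hq, hq, PySem.Dict.getD_of_not_contains d 0 (by simpa using hc)]
        · rw [if_neg hq]
    simp only [List.foldl, pvRoster]
    by_cases hk : ((pre.count p : Nat) : Int) < k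
    · have hcond : (if d.contains p then d else d.insert p 0).getD p 0 < k := by
        rw [hd' p, h p]; omega
      simp only [hcond, if_pos, hk]
      rw [ih (pre ++ [p]) _ (acc ++ ["ACCEPT"]) ?_]
      · simp
      · intro q
        rw [PySem.Dict.getD_insert]
        by_cases hq : q = p
        · rw [if_pos hq, hq, hd' p, h p]
          have : (pre ++ [p]).count p = pre.count p + 1 := by simp
          rw [this]; push_cast; omega
        · rw [if_neg hq, hd' q, h q]
          have : (pre ++ [p]).count q = pre.count q := by
            simp [List.count_append, List.count_singleton]
            exact fun hpq => hq hpq.symm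
          rw [this]
    · have hcond : ¬ (if d.contains p then d else d.insert p 0).getD p 0 < k := by
        rw [hd' p, h p]; omega
      simp only [hcond, hk, if_false]
      rw [ih (pre ++ [p]) _ (acc ++ ["REJECT"]) ?_]
      · simp
      · intro q
        rw [hd' q, h q]
        by_cases hq : q = p
        · subst hq
          have : (pre ++ [q]).count q = pre.count q + 1 := by simp
          rw [this]; push_cast; omega
        · have : (pre ++ [p]).count q = pre.count q := by
            simp [List.count_append, List.count_singleton]
            exact fun hpq => hq hpq.symm
          rw [this]

-- positions (from s) of the occurrences of p in t
def pvOcc (p : String) : List String → Nat → List Nat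
  | [], _ => []
  | q :: t, s => (if q = p then [s] else []) ++ pvOcc p t (s + 1)

lemma pvOcc_eq_filter (p : String) (t : List String) : ∀ (s : Nat),
    ((PySem.List.enumerate t (s : Int)).filter (fun ip => ip.2 == p)).map (·.1)
      = (pvOcc p t s).map (fun n : Nat => (n : Int)) := by
  induction t with
  | nil => intro s; simp [PySem.List.enumerate_nil, pvOcc]
  | cons q t ih =>
    intro s
    rw [PySem.List.enumerate_cons]
    have hih := ih (s + 1)
    push_cast at hih
    by_cases hq : q = p
    · simp [pvOcc, hq, hih]
    · simp [pvOcc, hq, hih]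

-- getElem characterisation: the d-th occurrence position
lemma pvOcc_getElem (p : String) (t : List String) : ∀ (s : Nat) (d : Nat) (h : d < (pvOcc p t s).length),
    ∃ (m : Nat) (hm : m < t.length), (pvOcc p t s)[d] = s + m ∧ t[m] = p ∧ (t.take m).count p = d := by
  induction t with
  | nil => intro s d h; simp [pvOcc] at h
  | cons q t ih =>
    intro s d h
    by_cases hq : q = p
    · subst hq
      cases d with
      | zero => exact ⟨0, by simp, by simp [pvOcc], by simp, by simp⟩
      | succ d =>
        have h' : d < (pvOcc q t (s + 1)).length := by simpa [pvOcc] using h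
        obtain ⟨m, hm, he, hp, hc⟩ := ih (s + 1) d h'
        refine ⟨m + 1, by simpa using hm, ?_, by simpa using hp, ?_⟩
        · simpa [pvOcc, he] using by omega
        · simp [List.take_succ_cons, hc]
    · have h' : d < (pvOcc p t (s + 1)).length := by simpa [pvOcc, hq] using h
      obtain ⟨m, hm, he, hp, hc⟩ := ih (s + 1) d h'
      refine ⟨m + 1, by simpa using hm, ?_, by simpa using hp, ?_⟩
      · simpa [pvOcc, hq, he] using by omega
      · simp [List.take_succ_cons, hc, hq]

-- coverage: each position of an occurrence of p is in pvOcc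
lemma pvOcc_mem (p : String) (t : List String) : ∀ (s : Nat) (m : Nat) (hm : m < t.length),
    t[m] = p → (s + m) ∈ pvOcc p t s := by
  induction t with
  | nil => intro s m hm; simp at hm
  | cons q t ih =>
    intro s m hm hp
    cases m with
    | zero => simp at hp; simp [pvOcc, hp]
    | succ m =>
      have hmem := ih (s + 1) m (by simpa using hm) (by simpa using hp)
      have harith : s + 1 + m = s + (m + 1) := by omega
      rw [harith] at hmem
      by_cases hq : q = p
      · simp only [pvOcc, if_pos hq, List.singleton_append, List.mem_cons]
        exact Or.inr hmem
      · simpa [pvOcc, hq] using hmem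

-- length of the scatter loop
lemma pvScatter_length (k : Int) (W : List (Int × Int)) :
    ∀ (res : List String),
    (W.foldl (fun res ri => res.set ri.2.toNat (if ri.1 < k then "ACCEPT" else "REJECT")) res).length
      = res.length := by
  induction W with
  | nil => intro res; simp
  | cons x L ih => intro res; simp [ih]

-- the scatter loop read at j: if anything writes at j all such writes carry v, else unchanged
lemma pvScatter_getElem? (k : Int) (W : List (Int × Int)) (j : Nat) (v : String)
    (hwrites : ∀ ri ∈ W, ri.2.toNat = j → (if ri.1 < k then "ACCEPT" else "REJECT") = v) :
    ∀ (res : List String) (hj : j < res.length),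
    (W.foldl (fun res ri => res.set ri.2.toNat (if ri.1 < k then "ACCEPT" else "REJECT")) res)[j]?
      = some (if W.any (fun ri => ri.2.toNat == j) then v else res[j]) := by
  induction W with
  | nil => intro res hj; simp [List.getElem?_eq_getElem hj]
  | cons x L ih =>
    intro res hj
    simp only [List.foldl_cons, List.any_cons]
    rw [ih (fun y hy hyj => hwrites y (List.mem_cons_of_mem x hy) hyj) _ (by simpa using hj)]
    by_cases hx : x.2.toNat = j
    · by_cases hL : L.any (fun y => y.2.toNat == j)
      · simp [hL, hx]
      · simp only [hL, Bool.or_false, hx]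
        simp [hwrites x (List.mem_cons_self) hx]
    · by_cases hL : L.any (fun y => y.2.toNat == j)
      · simp [hL]
      · simp [hL, hx]

-- membership gives an enumerate pair
lemma pv_mem_enumerate_of_mem {α : Type} (xs : List α) (x : α) (hx : x ∈ xs) :
    ∃ r : Int, (r, x) ∈ PySem.List.enumerate xs 0 := by
  obtain ⟨d, hd, he⟩ := List.getElem_of_mem hx
  exact ⟨(d : Int), by rw [PySem.List.mem_enumerate_iff]; exact ⟨d, hd, by simp [he]⟩⟩

-- B computes pvRoster too
lemma pvB_char (passwords : List String) (k : Int) :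
    getRegistrationStatus_alt passwords k = pvRoster k [] passwords := by
  simp only [getRegistrationStatus_alt]
  set groups := (PySem.List.enumerate passwords 0).foldl
    (fun d ip => d.modify ip.2 [] (· ++ [ip.1])) PySem.Dict.empty with hgroups
  have hnodup : groups.keys.Nodup := by
    rw [hgroups]
    exact PySem.Dict.nodup_keys_foldl_modify_key _ (fun ip => ip.2) []
      (fun (d : PySem.Dict String (List Int)) (ip : Int × String) => (· ++ [ip.1])) _
      (by simp [PySem.Dict.keys_empty])
  have hkeys : groups.keys = PySem.Set.ofList passwords := by
    rw [hgroups]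
    rw [PySem.Dict.keys_foldl_modify_key (l := PySem.List.enumerate passwords 0)
      (key := fun ip => ip.2) (d0 := [])
      (f := fun (d : PySem.Dict String (List Int)) (ip : Int × String) => (· ++ [ip.1]))
      (d := PySem.Dict.empty), PySem.List.map_snd_enumerate]
    simp [PySem.Dict.keys_empty, PySem.Set.update, PySem.Set.ofList_eq_foldl]
  have hgetD : ∀ p, groups.getD p [] = (pvOcc p passwords 0).map (fun n : Nat => (n : Int)) := by
    intro p
    have hswap : groups = ((PySem.List.enumerate passwords 0).map (fun ip => (ip.2, ip.1))).foldl
        (fun d q => d.modify q.1 [] (· ++ [q.2])) PySem.Dict.empty := by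
      rw [hgroups, List.foldl_map]
    rw [hswap, PySem.Dict.getD_foldl_modify_append, List.filter_map]
    have hfilter : ((PySem.List.enumerate passwords 0).filter
        ((fun q => q.1 == p) ∘ (fun ip => (ip.2, ip.1)))) =
        ((PySem.List.enumerate passwords 0).filter (fun ip => ip.2 == p)) := by
      apply List.filter_congr; intro x _; rfl
    rw [hfilter, List.map_map, PySem.Dict.getD_empty, List.nil_append]
    exact pvOcc_eq_filter p passwords 0
  rw [PySem.Dict.items_eq_map_keys groups hnodup [], List.foldl_map, ← List.foldl_flatMap]
  set W := groups.keys.flatMap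
    (fun p => PySem.List.enumerate (p, groups.getD p []).2 0) with hW
  apply List.ext_getElem?
  intro j
  by_cases hjn : j < passwords.length
  · -- the interesting indices
    have hwrites : ∀ ri ∈ W, ri.2.toNat = j →
        (if ri.1 < k then "ACCEPT" else "REJECT")
          = (if (((passwords.take j).count (passwords[j]'hjn) : Nat) : Int) < k
             then "ACCEPT" else "REJECT") := by
      intro ri hri hrij
      rw [hW] at hri
      obtain ⟨p, hp, hmem⟩ := List.mem_flatMap.mp hri
      simp only [hgetD p] at hmem
      rw [PySem.List.mem_enumerate_iff] at hmem
      obtain ⟨d, hd, he⟩ := hmem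
      have hd' : d < (pvOcc p passwords 0).length := by simpa using hd
      obtain ⟨m, hm, hoe, hpm, hcnt⟩ := pvOcc_getElem p passwords 0 d hd'
      have hri1 : ri.1 = (d : Int) := by rw [he]; simp
      have hri2 : ri.2 = (m : Int) := by
        rw [he]; simp [List.getElem_map, hoe]
      have hmj : m = j := by rw [← hrij, hri2]; simp
      subst hmj
      rw [hri1, ← hcnt]
      have hpj : passwords[m]'hjn = p := hpm
      rw [hpj]
    rw [pvScatter_getElem? k W j _ hwrites (List.replicate passwords.length "") (by simpa using hjn)]
    have hpmem : (passwords[j]'hjn) ∈ groups.keys := by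
      rw [hkeys]
      exact (PySem.Set.mem_ofList _ _).mpr (List.getElem_mem hjn)
    have hmemocc : j ∈ pvOcc (passwords[j]'hjn) passwords 0 := by
      have := pvOcc_mem (passwords[j]'hjn) passwords 0 j hjn rfl
      simpa using this
    have hmemocc' : ((j : Nat) : Int) ∈ (pvOcc (passwords[j]'hjn) passwords 0).map (fun n : Nat => (n : Int)) :=
      List.mem_map_of_mem hmemocc
    obtain ⟨r, hr⟩ := pv_mem_enumerate_of_mem _ _ hmemocc'
    have hxW : ((r, (j : Int)) : Int × Int) ∈ W := by
      rw [hW]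
      exact List.mem_flatMap.mpr ⟨passwords[j]'hjn, hpmem, by simpa [hgetD] using hr⟩
    have hany : W.any (fun ri => ri.2.toNat == j) = true :=
      List.any_eq_true.mpr ⟨(r, (j : Int)), hxW, by simp⟩
    rw [hany, if_pos rfl]
    rw [List.getElem?_eq_getElem (by rw [pvRoster_length]; exact hjn)]
    rw [pvRoster_getElem k passwords [] j hjn]
    simp
  · -- out of range on both sides
    have h1 : (pvRoster k [] passwords).length ≤ j := by rw [pvRoster_length]; omega
    have h2 : (W.foldl (fun res ri => res.set ri.2.toNat (if ri.1 < k then "ACCEPT" else "REJECT"))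
        (List.replicate passwords.length "")).length ≤ j := by
      rw [pvScatter_length]; simp; omega
    rw [List.getElem?_eq_none h2, List.getElem?_eq_none h1]

-- ===== VERDICT (by name: the statement is the Claim_ definition above) =====
theorem getRegistrationStatus_spec : Claim_equal_getRegistrationStatus := by
  intro passwords k _
  unfold Spec_getRegistrationStatus
  rw [pvB_char]
  unfold getRegistrationStatus
  rw [pvA_loop k passwords [] PySem.Dict.empty []
      (by intro p; simp [PySem.Dict.getD_empty])]
  simp
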